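-- pv_equiv track=rewrite | github.com/MFry/pyAlgoDataStructures | Top Coder/Greedy/SRM217_PlayGame.py | saveCreatures
-- ===== SOURCE A (Python) =====
-- def saveCreatures(your_army, comp_army):
--     comp_army.sort(reverse=True)
--     your_army.sort()
--     used = []
--     for piece in comp_army:
--         i = -1
--         if your_army[i] > piece:
--             while i + len(your_army) > 0:
--                 if your_army[i] <= piece:
--                     break
--                 i -= 1
--             used.append(your_army[i + 1])
--             your_army.remove(used[-1])
--         else:
--             your_army = your_army[1:]
--     return sum(your_army + used)
-- ===== SOURCE B (Python) =====
-- def saveCreatures(your_army, comp_army):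
--     # Sort both descending; one two-pointer pass counts the enemies that can be
--     # beaten (each matched with the weakest still-unused creature that beats it
--     # is equivalent, for the surviving SUM, to A's whole simulation: every
--     # unbeatable enemy kills exactly one of the globally smallest creatures).
--     ys = sorted(your_army, reverse=True)
--     cs = sorted(comp_army, reverse=True)
--     i = 0
--     matched = 0
--     for c in cs:
--         if i < len(ys) and ys[i] > c:
--             matched += 1
--             i += 1
--     d = len(cs) - matched
--     return sum(ys[:len(ys) - d])
-- ===== Notes on version B (the rewrite author's own statement) =====
-- stated objective: faster
-- what changed: Replaces A's O(m*n) pool simulation (backward scan + list remove/slice per enemy) by a closed-form: sort both armies descending, one two-pointer pass counts the beatable enemies, and the answer is the total minus the d smallest creatures where d is the number of unbeatable enemies.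
-- crash fix: A raises IndexError whenever comp_army is longer than your_army (the pool runs empty); B returns the sum of the strongest len(your_army)-d creatures there. — e.g. on saveCreatures([5], [1, 2]): A raises IndexError, B returns 0
import Mathlib
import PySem

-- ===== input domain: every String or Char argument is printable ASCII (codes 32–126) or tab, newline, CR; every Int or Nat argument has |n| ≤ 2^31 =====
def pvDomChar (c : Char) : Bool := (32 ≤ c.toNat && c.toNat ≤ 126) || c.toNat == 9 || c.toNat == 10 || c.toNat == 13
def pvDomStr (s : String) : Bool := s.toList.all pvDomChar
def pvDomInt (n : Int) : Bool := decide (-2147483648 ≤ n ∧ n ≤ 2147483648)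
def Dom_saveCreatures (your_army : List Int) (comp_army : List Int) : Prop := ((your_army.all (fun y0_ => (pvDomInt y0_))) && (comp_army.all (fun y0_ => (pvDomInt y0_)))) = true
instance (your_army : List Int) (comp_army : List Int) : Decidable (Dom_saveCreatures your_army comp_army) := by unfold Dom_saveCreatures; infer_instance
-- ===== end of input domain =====

-- B replaces A's O(m*n) pool simulation by sort + one two-pointer pass (objective: faster).
-- A sorts/mutates its list arguments in place; the equivalence proved here is about the return value only.

-- ===== PORT A =====
-- the inner 'while i + len(your_army) > 0: if your_army[i] <= piece: break; i -= 1' loop;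
-- fuel = arr.length + 1 is enough: i starts at -1 and the loop stops at i = -len at the latest
def pvFindI (arr : List Int) (piece : Int) : Nat → Int → Int
  | 0, i => i
  | fuel + 1, i =>
    if i + (arr.length : Int) > 0 then
      if PySem.List.pyGetD arr i 0 ≤ piece then i
      else pvFindI arr piece fuel (i - 1)
    else i

-- one iteration of A's 'for piece in comp_army' loop, state = (your_army, used)
def pvStepA (st : List Int × List Int) (piece : Int) : List Int × List Int :=
  if PySem.List.pyGetD st.1 (-1) 0 > piece then
    ((PySem.List.remove? st.1
        (PySem.List.pyGetD st.1 (pvFindI st.1 piece (st.1.length + 1) (-1) + 1) 0)).getD st.1,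
     st.2 ++ [PySem.List.pyGetD st.1 (pvFindI st.1 piece (st.1.length + 1) (-1) + 1) 0])
  else
    (PySem.List.slice st.1 (some 1) none, st.2)

def saveCreatures (your_army : List Int) (comp_army : List Int) : Int :=
  let comp := PySem.List.sorted comp_army (fun x => x) true
  let your := PySem.List.sorted your_army (fun x => x) false
  let res := comp.foldl pvStepA (your, [])
  (res.1 ++ res.2).sum

-- ===== PORT B =====
-- one iteration of B's two-pointer loop, state = (i, matched)
def pvTpStep (ys : List Int) (s : Nat × Int) (c : Int) : Nat × Int :=
  if s.1 < ys.length ∧ PySem.List.pyGetD ys (s.1 : Int) 0 > c then (s.1 + 1, s.2 + 1) else s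

def saveCreatures_alt (your_army : List Int) (comp_army : List Int) : Int :=
  let ys := PySem.List.sorted your_army (fun x => x) true
  let cs := PySem.List.sorted comp_army (fun x => x) true
  let st := cs.foldl (pvTpStep ys) (0, 0)
  let d : Int := (cs.length : Int) - st.2
  (PySem.List.slice ys none (some ((ys.length : Int) - d))).sum

-- ===== PRECONDITION & SPEC =====
-- A pops one creature from the pool per enemy, so it raises IndexError iff comp_army is longer
def Pre_saveCreatures (your_army : List Int) (comp_army : List Int) : Prop :=
  comp_army.length ≤ your_army.length
instance (your_army : List Int) (comp_army : List Int) : Decidable (Pre_saveCreatures your_army comp_army) := by unfold Pre_saveCreatures; infer_instance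

def pvWitness_saveCreatures : List Int × List Int := ([1, 3], [2])

-- A raises IndexError whenever comp_army is longer than your_army (the pool runs empty); B returns the sum of the strongest len(your_army)-d creatures there.
def Raises_saveCreatures (your_army : List Int) (comp_army : List Int) : Prop :=
  your_army.length < comp_army.length
instance (your_army : List Int) (comp_army : List Int) : Decidable (Raises_saveCreatures your_army comp_army) := by unfold Raises_saveCreatures; infer_instance

def pvRaiseWitness_saveCreatures : List Int × List Int := ([5], [1, 2])
def pvRaiseWitnessOut_saveCreatures : Int := 0

def Spec_saveCreatures (your_army : List Int) (comp_army : List Int) (out : Int) : Prop := out = saveCreatures_alt your_army comp_army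
instance (your_army : List Int) (comp_army : List Int) (out : Int) : Decidable (Spec_saveCreatures your_army comp_army out) := by unfold Spec_saveCreatures; infer_instance

-- ===== CLAIM (what is proved, stated in full; the proofs are below) =====
def Claim_equal_saveCreatures : Prop := ∀ (your_army : List Int) (comp_army : List Int), Dom_saveCreatures your_army comp_army → Pre_saveCreatures your_army comp_army → Spec_saveCreatures your_army comp_army (saveCreatures your_army comp_army)

def Claim_raises_saveCreatures : Prop := (∀ (your_army : List Int) (comp_army : List Int), Dom_saveCreatures your_army comp_army → Raises_saveCreatures your_army comp_army → ¬ Pre_saveCreatures your_army comp_army) ∧ (Dom_saveCreatures (pvRaiseWitness_saveCreatures.1) (pvRaiseWitness_saveCreatures.2) ∧ Raises_saveCreatures (pvRaiseWitness_saveCreatures.1) (pvRaiseWitness_saveCreatures.2) ∧ saveCreatures_alt (pvRaiseWitness_saveCreatures.1) (pvRaiseWitness_saveCreatures.2) = pvRaiseWitnessOut_saveCreatures)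

-- ===== LEMMAS AND PROOFS =====

-- proof-side model of B's two-pointer count: number of matched enemies starting at pointer i
def pvTp (ys : List Int) : List Int → Nat → Nat
  | [], _ => 0
  | c :: cs, i => if i < ys.length ∧ ys.getD i 0 > c then pvTp ys cs (i + 1) + 1 else pvTp ys cs i

theorem pvTp_le (ys : List Int) : ∀ (cs : List Int) (i : Nat), pvTp ys cs i ≤ cs.length := by
  intro cs
  induction cs with
  | nil => intro i; simp [pvTp]
  | cons c cs ih =>
    intro i
    simp only [pvTp, List.length_cons]
    split
    · have := ih (i + 1); omega
    · have := ih i; omega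

theorem pvFoldl_tp (ys : List Int) : ∀ (cs : List Int) (i : Nat) (m : Int),
    cs.foldl (pvTpStep ys) (i, m) = (i + pvTp ys cs i, m + (pvTp ys cs i : Int)) := by
  intro cs
  induction cs with
  | nil => intro i m; simp [pvTp]
  | cons c cs ih =>
    intro i m
    simp only [List.foldl_cons, pvTpStep, PySem.List.pyGetD_natCast, pvTp]
    by_cases h : i < ys.length ∧ ys.getD i 0 > c
    · rw [if_pos h, if_pos h, ih]
      refine Prod.ext ?_ ?_ <;> simp <;> [omega; (push_cast; ring)]
    · rw [if_neg h, if_neg h, ih]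

theorem pvTp_shift (hi lo : List Int) : ∀ (cs : List Int) (j : Nat),
    pvTp (hi ++ lo) cs (hi.length + j) = pvTp lo cs j := by
  intro cs
  induction cs with
  | nil => intro j; simp [pvTp]
  | cons c cs ih =>
    intro j
    have hget : (hi ++ lo).getD (hi.length + j) 0 = lo.getD j 0 := by
      rcases Nat.lt_or_ge j lo.length with hj | hj
      · rw [List.getD_eq_getElem _ _ (by simp; omega), List.getD_eq_getElem _ _ hj,
          List.getElem_append_right (by omega)]
        congr 1; omega
      · rw [List.getD_eq_default _ _ (by simp; omega), List.getD_eq_default _ _ hj]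
    simp only [pvTp, List.length_append, hget]
    split_ifs with h1 h2 h2
    · have := ih (j + 1); rw [← Nat.add_assoc] at this; omega
    · omega
    · omega
    · exact ih j

theorem pvTp_hi (c0 : Int) (hi lo : List Int) (hhi : ∀ x ∈ hi, c0 < x) :
    ∀ (cs : List Int) (i : Nat), i ≤ hi.length → (∀ y ∈ cs, y ≤ c0) →
    pvTp (hi ++ lo) cs i = min (hi.length - i) cs.length + pvTp lo (cs.drop (hi.length - i)) 0 := by
  intro cs
  induction cs with
  | nil => intro i hi'; simp [pvTp]
  | cons c cs ih =>
    intro i hile hcs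
    rcases Nat.lt_or_ge i hi.length with hlt | hge
    · have hget : (hi ++ lo).getD i 0 = hi[i] := by
        rw [List.getD_eq_getElem _ _ (by simp; omega), List.getElem_append_left hlt]
      have hcond : i < (hi ++ lo).length ∧ (hi ++ lo).getD i 0 > c := by
        refine ⟨by simp; omega, ?_⟩
        rw [hget]
        exact lt_of_le_of_lt (hcs c (by simp)) (hhi _ (List.getElem_mem _))
      rw [pvTp, if_pos hcond, ih (i + 1) (by omega) (fun y hy => hcs y (by simp [hy]))]
      have hd : (c :: cs).drop (hi.length - i) = cs.drop (hi.length - (i + 1)) := by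
        have : hi.length - i = (hi.length - (i + 1)) + 1 := by omega
        rw [this, List.drop_succ_cons]
      rw [hd]
      simp only [List.length_cons]
      omega
    · have hieq : i = hi.length := by omega
      subst hieq
      have := pvTp_shift hi lo (c :: cs) 0
      rw [Nat.add_zero] at this
      rw [this]
      simp

theorem pvTp_dropLast (ys : List Int) : ∀ (cs : List Int) (i : Nat),
    i + cs.length + 1 ≤ ys.length → pvTp ys cs i = pvTp ys.dropLast cs i := by
  intro cs
  induction cs with
  | nil => intro i _; simp [pvTp]
  | cons c cs ih =>
    intro i hlen
    have hi1 : i < ys.length - 1 := by simp at hlen ⊢; omega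
    have hget : ys.getD i 0 = ys.dropLast.getD i 0 := by
      rw [List.getD_eq_getElem _ _ (by omega), List.getD_eq_getElem _ _ (by simp; omega),
        List.getElem_dropLast]
    simp only [pvTp, List.length_dropLast, hget]
    split_ifs with h1 h2 h2
    · rw [ih (i + 1) (by simp at hlen ⊢; omega)]
    · omega
    · omega
    · exact ih i (by simp at hlen ⊢; omega)

-- pvFindI: scanning down from -k over a tail of elements all > piece
theorem pvFindI_all_gt (arr : List Int) (c : Int) (hall : ∀ x ∈ arr, c < x) :
    ∀ (fuel k : Nat), 1 ≤ k → k ≤ arr.length → arr.length + 1 ≤ fuel + k →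
    pvFindI arr c fuel (-(k : Int)) = -(arr.length : Int) := by
  intro fuel
  induction fuel with
  | zero => intro k _ _ hf; omega
  | succ fuel ih =>
    intro k hk1 hklen hf
    rcases Nat.lt_or_ge k arr.length with hlt | hge
    · rw [pvFindI, if_pos (by omega : -(k : Int) + (arr.length : Int) > 0),
        PySem.List.pyGetD_neg_natCast _ _ _ hk1 hklen,
        if_neg (not_le.mpr (hall _ (List.getElem_mem _)))]
      have hc : -(k : Int) - 1 = -((k + 1 : Nat) : Int) := by push_cast; ring
      rw [hc]
      exact ih (k + 1) (by omega) (by omega) (by omega)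
    · have hk : k = arr.length := by omega
      rw [pvFindI, if_neg (by omega : ¬(-(k : Int) + (arr.length : Int) > 0)), hk]

theorem pvFindI_split (S G : List Int) (c : Int) (hS : S ≠ []) (hSle : ∀ x ∈ S, x ≤ c)
    (hG : ∀ x ∈ G, c < x) :
    ∀ (fuel k : Nat), 1 ≤ k → k ≤ G.length + 1 → G.length + 2 ≤ fuel + k →
    pvFindI (S ++ G) c fuel (-(k : Int)) = -((G.length : Int) + 1) := by
  have hS1 : 1 ≤ S.length := List.length_pos_of_ne_nil hS
  intro fuel
  induction fuel with
  | zero => intro k _ _ hf; omega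
  | succ fuel ih =>
    intro k hk1 hkG hf
    have hlen : (S ++ G).length = S.length + G.length := by simp
    rcases Nat.lt_or_ge k (G.length + 1) with hlt | hge
    · -- k ≤ G.length : current element is in G, strictly greater than c
      have hkG' : k ≤ G.length := by omega
      have hidx : (S ++ G).length - k < (S ++ G).length := by omega
      have hgetG : (S ++ G)[(S ++ G).length - k] = G[G.length - k] := by
        rw [List.getElem_append_right (by omega)]
        congr 1
        omega
      rw [pvFindI, if_pos (by omega : -(k : Int) + ((S ++ G).length : Int) > 0),
        PySem.List.pyGetD_neg_natCast _ _ _ hk1 (by omega), hgetG,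
        if_neg (not_le.mpr (hG _ (List.getElem_mem _)))]
      have hc : -(k : Int) - 1 = -((k + 1 : Nat) : Int) := by push_cast; ring
      rw [hc]
      have h1 : 1 ≤ k + 1 := by omega
      have h2 : k + 1 ≤ G.length + 1 := by omega
      have h3 : G.length + 2 ≤ fuel + (k + 1) := by omega
      exact ih (k + 1) h1 h2 h3
    · have hk : k = G.length + 1 := by omega
      subst hk
      rcases Nat.lt_or_ge (G.length + 1) (S ++ G).length with hlt2 | hge2
      · -- the element at that position is the last of S, which is ≤ c: break
        have hgetS : (S ++ G)[(S ++ G).length - (G.length + 1)] = S[S.length - 1] := by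
          rw [List.getElem_append_left (by omega)]
          congr 1
          omega
        rw [pvFindI, if_pos (by omega : -((G.length + 1 : Nat) : Int) + ((S ++ G).length : Int) > 0),
          PySem.List.pyGetD_neg_natCast _ _ _ (by omega) (by omega), hgetS,
          if_pos (hSle _ (List.getElem_mem _))]
        push_cast
        ring
      · -- S is a singleton: the while-condition itself fails and we return the same index
        rw [pvFindI, if_neg (by omega : ¬(-((G.length + 1 : Nat) : Int) + ((S ++ G).length : Int) > 0))]
        push_cast
        ring

-- A's step on a sorted pool, drop branch: all of the pool is ≤ piece
theorem pvStepA_drop (a u : List Int) (c : Int) (ha : a ≠ []) (hle : a.getLast ha ≤ c) :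
    pvStepA (a, u) c = (a.tail, u) := by
  simp only [pvStepA]
  rw [PySem.List.pyGetD_neg_one a 0 ha, if_neg (not_lt.mpr hle), PySem.List.slice_from_one]

-- A's step, use branch, some element ≤ piece: removes the smallest element > piece
theorem pvStepA_use_some (S G u : List Int) (c : Int) (hS : S ≠ []) (hG : G ≠ [])
    (hSle : ∀ x ∈ S, x ≤ c) (hGgt : ∀ x ∈ G, c < x) :
    pvStepA (S ++ G, u) c = (S ++ G.tail, u ++ [G.head hG]) := by
  have hg1 : 1 ≤ G.length := List.length_pos_of_ne_nil hG
  have hne : S ++ G ≠ [] := by simp [hG]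
  have hgt : PySem.List.pyGetD (S ++ G) (-1) 0 > c := by
    rw [PySem.List.pyGetD_neg_one (S ++ G) 0 hne, List.getLast_append_of_right_ne_nil S G hG]
    exact hGgt _ (List.getLast_mem hG)
  simp only [pvStepA]
  rw [if_pos hgt]
  have hfind : pvFindI (S ++ G) c ((S ++ G).length + 1) (-1) = -((G.length : Int) + 1) := by
    have := pvFindI_split S G c hS hSle hGgt ((S ++ G).length + 1) 1 (by omega)
      (by omega) (by simp only [List.length_append]; omega)
    simpa using this
  simp only [hfind]
  have hcast : -((G.length : Int) + 1) + 1 = -((G.length : Nat) : Int) := by ring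
  rw [hcast, PySem.List.pyGetD_neg_natCast _ _ _ hg1 (by simp)]
  have hvget : (S ++ G)[(S ++ G).length - G.length]'(by simp; omega) = G.head hG := by
    rw [List.getElem_append_right (by simp), List.head_eq_getElem hG]
    congr 1
    simp
  rw [hvget]
  have hmem : G.head hG ∈ S ++ G := by simp [List.head_mem hG]
  rw [PySem.List.remove?_eq_some_erase _ _ hmem]
  have hnotS : G.head hG ∉ S := by
    intro hin
    exact absurd (hSle _ hin) (not_le.mpr (hGgt _ (List.head_mem hG)))
  rw [List.erase_append_right _ hnotS]
  obtain ⟨g0, gt, rfl⟩ := List.exists_cons_of_ne_nil hG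
  simp

-- A's step, use branch, whole pool > piece, singleton pool
theorem pvStepA_use_one (x : Int) (u : List Int) (c : Int) (hx : c < x) :
    pvStepA ([x], u) c = ([], u ++ [x]) := by
  simp only [pvStepA]
  rw [PySem.List.pyGetD_neg_one [x] 0 (by simp)]
  rw [if_pos (by simpa using hx)]
  have hfind : pvFindI [x] c (([x] : List Int).length + 1) (-1) = -1 := by
    simp [pvFindI]
  rw [hfind]
  have h0 : (-1 : Int) + 1 = 0 := by norm_num
  rw [h0, PySem.List.pyGetD_zero_cons, PySem.List.remove?_cons_self]
  simp

-- A's step, use branch, whole pool > piece, |pool| ≥ 2: A's off-the-front quirk removes a[1]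
theorem pvStepA_use_allgt (x y : Int) (rest u : List Int) (c : Int)
    (hgt : ∀ z ∈ x :: y :: rest, c < z) :
    pvStepA (x :: y :: rest, u) c = (x :: rest, u ++ [y]) := by
  set a := x :: y :: rest with ha
  have ha2 : 2 ≤ a.length := by simp [ha]
  have hane : a ≠ [] := by simp [ha]
  simp only [pvStepA]
  rw [PySem.List.pyGetD_neg_one a 0 hane,
    if_pos (hgt _ (List.getLast_mem hane))]
  have hfind : pvFindI a c (a.length + 1) (-1) = -(a.length : Int) := by
    have := pvFindI_all_gt a c hgt (a.length + 1) 1 (by omega) (by omega) (by omega)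
    simpa using this
  simp only [hfind]
  have hcast : -(a.length : Int) + 1 = -(((a.length - 1 : Nat)) : Int) := by omega
  rw [hcast, PySem.List.pyGetD_neg_natCast _ _ _ (by omega) (by omega)]
  have hidx : a.length - (a.length - 1) = 1 := by omega
  have hvget : a[a.length - (a.length - 1)]'(by omega) = y := by
    simp only [hidx]
    simp [ha]
  rw [hvget]
  by_cases hxy : x = y
  · subst hxy
    rw [ha, PySem.List.remove?_cons_self]
    simp
  · rw [ha, PySem.List.remove?_cons_of_ne _ hxy, PySem.List.remove?_cons_self]
    simp

theorem pvTp_nil : ∀ (cs : List Int) (i : Nat), pvTp ([] : List Int) cs i = 0 := by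
  intro cs
  induction cs with
  | nil => intro i; simp [pvTp]
  | cons c cs ih => intro i; simp [pvTp, ih]

theorem pvTp_all (ysd cs : List Int) (c0 : Int) (h1 : ∀ x ∈ ysd, c0 < x)
    (h2 : ∀ y ∈ cs, y ≤ c0) (hlen : cs.length ≤ ysd.length) : pvTp ysd cs 0 = cs.length := by
  have h := pvTp_hi c0 ysd [] h1 cs 0 (by omega) h2
  rw [List.append_nil] at h
  rw [h, pvTp_nil]
  omega

-- the heart: A's simulation on a sorted pool computes total − (sum of the d smallest),
-- d = enemies − two-pointer matches
theorem pvMain : ∀ (cs a u : List Int),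
    a.Pairwise (· ≤ ·) → cs.Pairwise (fun p q => q ≤ p) → cs.length ≤ a.length →
    (((cs.foldl pvStepA (a, u)).1 ++ (cs.foldl pvStepA (a, u)).2).sum : Int)
      = a.sum + u.sum - (a.take (cs.length - pvTp a.reverse cs 0)).sum := by
  intro cs
  induction cs with
  | nil =>
    intro a u _ _ _
    simp [pvTp]
  | cons c cs ih =>
    intro a u ha hcs hlen
    have hcge : ∀ y ∈ cs, y ≤ c := fun y hy => List.rel_of_pairwise_cons hcs hy
    have hcs' : cs.Pairwise (fun p q => q ≤ p) := (List.pairwise_cons.mp hcs).2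
    have hane : a ≠ [] := by
      intro h; subst h; simp at hlen
    -- split the sorted pool at the piece: S = elements ≤ c, G = elements > c
    have hdec : ∃ S G : List Int, S ++ G = a ∧ (∀ x ∈ S, x ≤ c) ∧ (∀ x ∈ G, c < x) := by
      refine ⟨a.takeWhile (fun x => x ≤ c), a.dropWhile (fun x => x ≤ c),
        List.takeWhile_append_dropWhile, fun x hx => by simpa using List.mem_takeWhile_imp hx, ?_⟩
      intro x hx
      have hGne : a.dropWhile (fun x => x ≤ c) ≠ [] := List.ne_nil_of_mem hx
      have hpw : (a.dropWhile (fun x => x ≤ c)).Pairwise (· ≤ ·) :=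
        List.Pairwise.sublist (List.dropWhile_sublist _) ha
      have hh : c < (a.dropWhile (fun x => x ≤ c)).head hGne := by
        have := List.head_dropWhile_not (fun x : Int => decide (x ≤ c)) hGne
        simpa using this
      obtain ⟨h0, t, hG0⟩ := List.exists_cons_of_ne_nil hGne
      rw [hG0] at hx hpw
      have hh2 : c < h0 := by simpa only [hG0, List.head_cons] using hh
      clear hh
      rcases List.mem_cons.mp hx with rfl | hxt
      · exact hh2
      · exact lt_of_lt_of_le hh2 (List.rel_of_pairwise_cons hpw hxt)
    obtain ⟨S, G, rfl, hSle, hGgt⟩ := hdec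
    rw [List.foldl_cons]
    by_cases hGne : G = []
    · -- drop branch: every creature is ≤ c, the smallest dies
      subst hGne
      simp only [List.append_nil] at *
      have hgl : S.getLast hane ≤ c := hSle _ (List.getLast_mem hane)
      rw [pvStepA_drop S u c hane hgl]
      obtain ⟨h0, t, rfl⟩ := List.exists_cons_of_ne_nil hane
      simp only [List.tail_cons]
      have hlen' : cs.length ≤ t.length := by simp at hlen ⊢; omega
      rw [ih t u ha.tail hcs' hlen']
      -- the two-pointer never matches c and never looks at the last (smallest) creature
      have hgl' : (h0 :: t).reverse.getD 0 0 ≤ c := by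
        have heq : (h0 :: t).reverse.getD 0 0 = (h0 :: t).getLast hane := by
          rw [List.getD_eq_getElem _ _ (by simp : 0 < (h0 :: t).reverse.length),
            List.getElem_reverse, List.getLast_eq_getElem]
          congr 1
        rw [heq]
        exact hgl
      have htp0 : pvTp (h0 :: t).reverse (c :: cs) 0 = pvTp (h0 :: t).reverse cs 0 := by
        simp only [pvTp]
        rw [if_neg]
        rintro ⟨hl, hgt⟩
        exact absurd hgt (not_lt.mpr hgl')
      have htpd : pvTp (h0 :: t).reverse cs 0 = pvTp t.reverse cs 0 := by
        rw [pvTp_dropLast _ cs 0 (by simp at hlen ⊢; omega), List.dropLast_reverse]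
        rfl
      rw [htp0, htpd]
      have hklt : cs.length - pvTp t.reverse cs 0 + 1 = (c :: cs).length - pvTp t.reverse cs 0 := by
        have := pvTp_le t.reverse cs 0
        simp only [List.length_cons]
        omega
      rw [← hklt, List.take_succ_cons, List.sum_cons, List.sum_cons]
      ring
    · -- use branch: the smallest creature beating c fights and survives
      obtain ⟨g0, gt, rfl⟩ := List.exists_cons_of_ne_nil hGne
      by_cases hSne : S = []
      · -- whole pool is stronger than c (and than every later piece): nobody ever dies
        subst hSne
        simp only [List.nil_append] at *
        have hgtall : ∀ y ∈ c :: cs, y ≤ c := by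
          intro y hy
          rcases List.mem_cons.mp hy with rfl | hyt
          · exact le_refl y
          · exact hcge y hyt
        have htp0 : pvTp (g0 :: gt).reverse (c :: cs) 0 = (c :: cs).length :=
          pvTp_all _ _ c (fun x hx => hGgt x (List.mem_reverse.mp hx)) hgtall
            (by simpa using hlen)
        rw [htp0, Nat.sub_self, List.take_zero]
        cases gt with
        | nil =>
          have hcs0 : cs = [] := by
            cases cs with
            | nil => rfl
            | cons _ _ => simp at hlen
          subst hcs0
          rw [pvStepA_use_one g0 u c (hGgt g0 (by simp))]
          simp [add_comm]
        | cons y rest =>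
          rw [pvStepA_use_allgt g0 y rest u c hGgt]
          have hpw' : (g0 :: rest).Pairwise (· ≤ ·) :=
            List.Pairwise.sublist
              (List.Sublist.cons₂ g0 (List.sublist_cons_self y rest)) ha
          have hlen' : cs.length ≤ (g0 :: rest).length := by
            simp at hlen ⊢
            omega
          rw [ih (g0 :: rest) (u ++ [y]) hpw' hcs' hlen']
          have htpin : pvTp (g0 :: rest).reverse cs 0 = cs.length :=
            pvTp_all _ _ c
              (fun x hx => hGgt x (by
                rcases List.mem_reverse.mp hx with h | h
                · exact List.mem_cons_self
                · simp [List.mem_cons]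
                  tauto))
              hcge (by simpa using hlen')
          rw [htpin, Nat.sub_self, List.take_zero]
          simp
          ring
      · rw [pvStepA_use_some S (g0 :: gt) u c hSne hGne hSle hGgt]
        simp only [List.tail_cons, List.head_cons]
        have hpw' : (S ++ gt).Pairwise (· ≤ ·) :=
          List.Pairwise.sublist
            (List.Sublist.append_left (List.sublist_cons_self g0 gt) S) ha
        have hlen' : cs.length ≤ (S ++ gt).length := by
          simp at hlen ⊢
          omega
        rw [ih (S ++ gt) (u ++ [g0]) hpw' hcs' hlen']
        have hT1 : pvTp (S ++ g0 :: gt).reverse cs 1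
            = min gt.length cs.length + pvTp S.reverse (cs.drop gt.length) 0 := by
          rw [List.reverse_append]
          have h := pvTp_hi c (g0 :: gt).reverse S.reverse
            (fun x hx => hGgt x (List.mem_reverse.mp hx)) cs 1 (by simp) hcge
          simpa using h
        have hT2 : pvTp (S ++ gt).reverse cs 0
            = min gt.length cs.length + pvTp S.reverse (cs.drop gt.length) 0 := by
          rw [List.reverse_append]
          have h := pvTp_hi c gt.reverse S.reverse
            (fun x hx => hGgt x (List.mem_cons_of_mem _ (List.mem_reverse.mp hx))) cs 0
            (by simp) hcge
          simpa using h
        have hne2 : S ++ g0 :: gt ≠ [] := by simp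
        have htp0 : pvTp (S ++ g0 :: gt).reverse (c :: cs) 0
            = pvTp (S ++ g0 :: gt).reverse cs 1 + 1 := by
          have heq : (S ++ g0 :: gt).reverse.getD 0 0 = (S ++ g0 :: gt).getLast hne2 := by
            rw [List.getD_eq_getElem _ _ (by simp), List.getElem_reverse,
              List.getLast_eq_getElem]
            congr 1
          have hgtlast : (S ++ g0 :: gt).reverse.getD 0 0 > c := by
            rw [heq, List.getLast_append_of_right_ne_nil S _ (by simp)]
            exact hGgt _ (List.getLast_mem (by simp))
          simp only [pvTp]
          rw [if_pos ⟨by simp, hgtlast⟩]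
        have hkeq : (c :: cs).length - pvTp (S ++ g0 :: gt).reverse (c :: cs) 0
            = cs.length - pvTp (S ++ gt).reverse cs 0 := by
          rw [htp0, hT1, hT2]
          simp only [List.length_cons]
          omega
        have hk_le : cs.length - pvTp (S ++ gt).reverse cs 0 ≤ S.length := by
          rw [hT2]
          have hlenN : cs.length + 1 ≤ S.length + (gt.length + 1) := by simpa using hlen
          omega
        rw [hkeq, List.take_append_of_le_length hk_le, List.take_append_of_le_length hk_le]
        simp [List.sum_append, List.sum_cons]
        ring

-- ===== VERDICT (by name: the statement is the Claim_ definition above) =====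
theorem saveCreatures_spec : Claim_equal_saveCreatures := by
  intro ya ca _ hpre
  unfold Pre_saveCreatures at hpre
  unfold Spec_saveCreatures saveCreatures saveCreatures_alt
  dsimp only
  set your := PySem.List.sorted ya (fun x => x) false with hyour
  set comp := PySem.List.sorted ca (fun x => x) true with hcomp
  set ysd := PySem.List.sorted ya (fun x => x) true with hysd
  -- sorted descending is the reverse of sorted ascending (as lists of values)
  have hrev : ysd = your.reverse := by
    refine List.Perm.eq_of_pairwise (le := fun a b : Int => b ≤ a)
      (fun a b _ _ h1 h2 => le_antisymm h2 h1) ?_ ?_ ?_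
    · simpa using PySem.List.sorted_pairwise_rev ya (fun x => x)
    · rw [List.pairwise_reverse]
      simpa using PySem.List.sorted_pairwise ya (fun x => x)
    · exact (PySem.List.sorted_perm ya _ true).trans
        ((PySem.List.sorted_perm ya _ false).symm.trans (List.reverse_perm your).symm)
  have hyourpw : your.Pairwise (· ≤ ·) := by
    simpa using PySem.List.sorted_pairwise ya (fun x => x)
  have hcomppw : comp.Pairwise (fun p q => q ≤ p) := by
    simpa using PySem.List.sorted_pairwise_rev ca (fun x => x)
  have hlen : comp.length ≤ your.length := by
    rw [hcomp, hyour, PySem.List.length_sorted, PySem.List.length_sorted]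
    exact hpre
  have hmain := pvMain comp your [] hyourpw hcomppw hlen
  simp only [List.sum_nil, add_zero] at hmain
  rw [hmain, pvFoldl_tp ysd comp 0 0]
  have hTle : pvTp ysd comp 0 ≤ comp.length := pvTp_le _ _ _
  have hlen2 : ysd.length = your.length := by rw [hrev, List.length_reverse]
  have hb : (ysd.length : Int) - ((comp.length : Int) - (0 + (pvTp ysd comp 0 : Int)))
      = ((your.length - (comp.length - pvTp ysd comp 0) : Nat) : Int) := by
    omega
  rw [hb, PySem.List.slice_to_natCast]
  rw [hrev]
  set k := comp.length - pvTp your.reverse comp 0 with hk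
  have hkle : k ≤ your.length := by omega
  have hidx : your.length - (your.length - k) = k := by omega
  rw [List.take_reverse, hidx, List.sum_reverse]
  have hsplit := congrArg List.sum (List.take_append_drop k your)
  rw [List.sum_append] at hsplit
  omega

@[simp] theorem saveCreatures_raises : Claim_raises_saveCreatures := by
  unfold Claim_raises_saveCreatures
  constructor
  · intro ya ca _ hr hp
    exact absurd hp (by unfold Pre_saveCreatures; unfold Raises_saveCreatures at hr; omega)
  · exact ⟨by decide, by decide, by decide⟩
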